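-- pv_equiv track=rewrite | github.com/c41-gg/Pantasa | GramSizeClustering.py | cluster_ngrams
-- ===== SOURCE A (Python) =====
-- from collections import defaultdict
-- from collections import defaultdict
--
-- def generate_ngrams(tokens, n):
--     ngrams = [tokens[i:i+n] for i in range(len(tokens)-n+1)]
--     return [" ".join(ngram) for ngram in ngrams]
--
-- def cluster_ngrams(tagged_sentences, min_n=4):
--     clustered_ngrams = defaultdict(list)
--     for sentence in tagged_sentences:
--         tokens = sentence.split()
--         for n in range(min_n, len(tokens) + 1):  # Generate n-grams from size min_n to the length of the tokens
--             ngrams = generate_ngrams(tokens, n)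
--             clustered_ngrams[n].extend(ngrams)
--     return clustered_ngrams
-- ===== SOURCE B (Python) =====
-- from collections import defaultdict
--
-- def cluster_ngrams(tagged_sentences, min_n=4):
--     # Position-major single pass: for each start position grow the window one
--     # token at a time, emitting every window of size >= min_n as it forms,
--     # instead of re-slicing the sentence once per n-gram size.
--     clustered_ngrams = defaultdict(list)
--     for sentence in tagged_sentences:
--         tokens = sentence.split()
--         for i in range(len(tokens)):
--             window = []
--             for j in range(i, len(tokens)):
--                 window.append(tokens[j])
--                 size = j - i + 1
--                 if size >= min_n:
--                     clustered_ngrams[size].append(" ".join(window))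
--     return clustered_ngrams
-- ===== Notes on version B (the rewrite author's own statement) =====
-- stated objective: alternative
-- what changed: Replaces A's size-major scheme (for each n, a generate_ngrams pass that re-slices the sentence at every start) with a position-major single pass: for each start position one growing window is extended token by token and every window of size >= min_n is emitted as it forms, so the per-size slicing helper disappears.
-- outside the precondition, e.g. on cluster_ngrams(['a'], 0): A returns {0: ['', ''], 1: ['a']}, B returns {1: ['a']}
import Mathlib
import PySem

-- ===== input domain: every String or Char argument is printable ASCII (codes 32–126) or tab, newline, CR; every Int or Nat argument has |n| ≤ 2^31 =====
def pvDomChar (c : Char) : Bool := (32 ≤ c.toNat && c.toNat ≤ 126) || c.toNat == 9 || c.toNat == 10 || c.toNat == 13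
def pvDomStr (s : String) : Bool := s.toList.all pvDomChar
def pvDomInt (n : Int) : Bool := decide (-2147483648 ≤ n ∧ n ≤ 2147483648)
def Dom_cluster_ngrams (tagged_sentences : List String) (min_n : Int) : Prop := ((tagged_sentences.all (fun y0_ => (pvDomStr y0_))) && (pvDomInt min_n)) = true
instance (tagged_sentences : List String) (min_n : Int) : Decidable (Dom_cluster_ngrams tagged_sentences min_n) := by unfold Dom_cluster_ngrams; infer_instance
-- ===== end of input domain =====

-- B replaces A's size-major scheme (per-n generate_ngrams slicing passes) with a position-major
-- single pass growing one window per start position and emitting every size >= min_n as it forms.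

-- ===== PORT A =====
def pv_generate_ngrams (tokens : List String) (n : Int) : List String :=
  let ngrams := (PySem.List.pyRange 0 ((tokens.length : Int) - n + 1) 1).map
      (fun i => PySem.List.slice tokens (some i) (some (i + n)))
  ngrams.map (fun ngram => PySem.Str.join " " ngram)

def cluster_ngrams (tagged_sentences : List String) (min_n : Int) : List (Int × List String) :=
  (tagged_sentences.foldl
    (fun d sentence =>
      let tokens := PySem.Str.split₀ sentence
      (PySem.List.pyRange min_n ((tokens.length : Int) + 1) 1).foldl
        (fun d n => d.insert n (d.getD n [] ++ pv_generate_ngrams tokens n)) d)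
    PySem.Dict.empty).items

-- ===== PORT B =====
def cluster_ngrams_alt (tagged_sentences : List String) (min_n : Int) : List (Int × List String) :=
  (tagged_sentences.foldl
    (fun d sentence =>
      let tokens := PySem.Str.split₀ sentence
      (PySem.List.pyRange 0 ((tokens.length : Int)) 1).foldl
        (fun d i =>
          ((PySem.List.pyRange i ((tokens.length : Int)) 1).foldl
            (fun (st : List String × PySem.Dict Int (List String)) j =>
              let window := st.1 ++ [PySem.List.pyGetD tokens j ""]
              let size := j - i + 1
              (window,
                if min_n ≤ size
                then st.2.insert size (st.2.getD size [] ++ [PySem.Str.join " " window])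
                else st.2))
            ([], d)).2)
        d)
    PySem.Dict.empty).items

-- ===== PRECONDITION & SPEC =====
-- Pre_ excludes non-positive min_n, outside the natural domain of n-gram sizes: there A pads the
-- result with clusters of empty-string "n-grams" keyed by sizes <= 0 (Python slicing artefact),
-- which B's growing window (always of positive size) never produces.
def Pre_cluster_ngrams (tagged_sentences : List String) (min_n : Int) : Prop := 1 ≤ min_n
instance (tagged_sentences : List String) (min_n : Int) : Decidable (Pre_cluster_ngrams tagged_sentences min_n) := by unfold Pre_cluster_ngrams; infer_instance
def pvWitness_cluster_ngrams : List String × Int := (["a b c d e", "x y z"], 2)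

def Spec_cluster_ngrams (tagged_sentences : List String) (min_n : Int) (out : List (Int × List String)) : Prop := out = cluster_ngrams_alt tagged_sentences min_n
instance (tagged_sentences : List String) (min_n : Int) (out : List (Int × List String)) : Decidable (Spec_cluster_ngrams tagged_sentences min_n out) := by unfold Spec_cluster_ngrams; infer_instance

-- ===== CLAIM (what is proved, stated in full; the proofs are below) =====
def Claim_equal_cluster_ngrams : Prop := ∀ (tagged_sentences : List String) (min_n : Int), Dom_cluster_ngrams tagged_sentences min_n → Pre_cluster_ngrams tagged_sentences min_n → Spec_cluster_ngrams tagged_sentences min_n (cluster_ngrams tagged_sentences min_n)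

-- ===== LEMMAS AND PROOFS =====

-- concatenation of all size-n n-grams over a list of token lists
def pvFlat (tls : List (List String)) (n : Int) : List String :=
  tls.flatMap (fun t => pv_generate_ngrams t n)

-- running maximum token count, seeded with lo - 1
def pvMax (tls : List (List String)) (lo : Int) : Int :=
  tls.foldl (fun acc t => max acc ((t.length : Int))) (lo - 1)

-- the n-gram of t starting at s with n tokens, as B computes it
def pvGram (t : List String) (s n : Int) : String :=
  PySem.Str.join " " (PySem.List.slice t (some s) (some (s + n)))

-- B's defaultdict append
def pvUpd (d : PySem.Dict Int (List String)) (n : Int) (x : String) : PySem.Dict Int (List String) :=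
  d.insert n (d.getD n [] ++ [x])

lemma pv_gen_nil {t : List String} {n : Int} (h : (t.length : Int) < n) :
    pv_generate_ngrams t n = [] := by
  unfold pv_generate_ngrams
  rw [PySem.List.pyRange_one_eq_nil (by omega)]
  rfl

lemma pv_flat_nil (tls : List (List String)) (lo n : Int) (h : pvMax tls lo < n) :
    pvFlat tls n = [] := by
  unfold pvFlat
  rw [List.flatMap_eq_nil_iff]
  intro t ht
  exact pv_gen_nil (lt_of_le_of_lt ((PySem.List.le_foldl_max_int tls (fun t => ((t.length : Int))) (lo - 1)).2 t ht) h)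

lemma pv_keys_canon (lo b : Int) (v : Int → List String) :
    (PySem.Dict.mk ((PySem.List.pyRange lo b 1).map (fun n => (n, v n)))).keys
      = PySem.List.pyRange lo b 1 := by
  simp [PySem.Dict.keys, List.map_map, Function.comp_def]

-- overwrite phase: every key of [a, c) already exists in the dict (c ≤ M+1)
lemma pv_ovw (g : Int → List String) (lo M : Int) :
    ∀ (k : Nat) (a c : Int) (v : Int → List String), c - a ≤ (k : Int) → lo ≤ a → c ≤ M + 1 →
    ((PySem.List.pyRange a c 1).foldl (fun d n => d.insert n (d.getD n [] ++ g n))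
        (PySem.Dict.mk ((PySem.List.pyRange lo (M + 1) 1).map (fun n => (n, v n))))).items
      = (PySem.List.pyRange lo (M + 1) 1).map
          (fun n => (n, if a ≤ n ∧ n < c then v n ++ g n else v n)) := by
  intro k
  induction k with
  | zero =>
    intro a c v hk ha hc
    rw [PySem.List.pyRange_one_eq_nil (a := a) (b := c) (by omega)]
    simp only [List.foldl_nil]
    apply List.map_congr_left
    intro n hn
    have hnc : ¬ (a ≤ n ∧ n < c) := by omega
    simp [hnc]
  | succ k ih =>
    intro a c v hk ha hc
    by_cases hac : c ≤ a
    · rw [PySem.List.pyRange_one_eq_nil (a := a) (b := c) hac]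
      simp only [List.foldl_nil]
      apply List.map_congr_left
      intro n hn
      have hnc : ¬ (a ≤ n ∧ n < c) := by omega
      simp [hnc]
    · rw [PySem.List.pyRange_one_cons (a := a) (b := c) (by omega)]
      simp only [List.foldl_cons]
      have hmemA : a ∈ PySem.List.pyRange lo (M + 1) 1 :=
        (PySem.List.mem_pyRange_one).2 ⟨ha, by omega⟩
      have hnodup : (PySem.Dict.mk ((PySem.List.pyRange lo (M + 1) 1).map (fun n => (n, v n)))).keys.Nodup := by
        rw [pv_keys_canon]; exact PySem.List.nodup_pyRange_one lo (M + 1)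
      have hmem2 : ((a, v a) : Int × List String) ∈ (PySem.Dict.mk ((PySem.List.pyRange lo (M + 1) 1).map (fun n => (n, v n)))).items :=
        List.mem_map.2 ⟨a, hmemA, rfl⟩
      have hgetD : (PySem.Dict.mk ((PySem.List.pyRange lo (M + 1) 1).map (fun n => (n, v n)))).getD a [] = v a :=
        PySem.Dict.getD_of_mem_items _ hmem2 hnodup []
      have hcont : (PySem.Dict.mk ((PySem.List.pyRange lo (M + 1) 1).map (fun n => (n, v n)))).contains a = true := by
        rw [PySem.Dict.contains_eq_decide_mem_keys, pv_keys_canon]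
        exact decide_eq_true hmemA
      have hd : ((PySem.Dict.mk ((PySem.List.pyRange lo (M + 1) 1).map (fun n => (n, v n)))).insert a
            ((PySem.Dict.mk ((PySem.List.pyRange lo (M + 1) 1).map (fun n => (n, v n)))).getD a [] ++ g a))
          = PySem.Dict.mk ((PySem.List.pyRange lo (M + 1) 1).map
              (fun n => (n, if n = a then v a ++ g a else v n))) := by
        apply PySem.Dict.ext
        rw [hgetD, PySem.Dict.items_insert_of_contains _ _ hcont]
        simp only [List.map_map]
        apply List.map_congr_left
        intro n hn
        by_cases hna : n = a <;> simp [hna]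
      rw [hd, ih (a + 1) c (fun n => if n = a then v a ++ g a else v n) (by omega) (by omega) hc]
      apply List.map_congr_left
      intro n hn
      by_cases hna : n = a
      · subst hna
        have h1 : ¬ (n + 1 ≤ n ∧ n < c) := by omega
        have h2 : n ≤ n ∧ n < c := by omega
        simp [h2]
      · have h3 : (a < n ∧ n < c) ↔ (a ≤ n ∧ n < c) := by omega
        simp [hna, h3]

-- fresh phase: every key of [a, b) is new (the dict holds exactly the keys [lo, a))
lemma pv_fresh (g : Int → List String) (lo : Int) :
    ∀ (k : Nat) (a b : Int) (u : Int → List String), b - a ≤ (k : Int) → lo ≤ a → a ≤ b →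
    ((PySem.List.pyRange a b 1).foldl (fun d n => d.insert n (d.getD n [] ++ g n))
        (PySem.Dict.mk ((PySem.List.pyRange lo a 1).map (fun n => (n, u n))))).items
      = (PySem.List.pyRange lo b 1).map (fun n => (n, if a ≤ n then g n else u n)) := by
  intro k
  induction k with
  | zero =>
    intro a b u hk ha hab
    have hba : b = a := by omega
    subst hba
    rw [PySem.List.pyRange_one_eq_nil (a := b) (b := b) le_rfl]
    simp only [List.foldl_nil]
    apply List.map_congr_left
    intro n hn
    have hn' := (PySem.List.mem_pyRange_one).1 hn
    have hnb : ¬ (b ≤ n) := by omega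
    simp [hnb]
  | succ k ih =>
    intro a b u hk ha hab
    rcases eq_or_lt_of_le hab with hba | hba
    · subst hba
      rw [PySem.List.pyRange_one_eq_nil (a := a) (b := a) le_rfl]
      simp only [List.foldl_nil]
      apply List.map_congr_left
      intro n hn
      have hn' := (PySem.List.mem_pyRange_one).1 hn
      have hnb : ¬ (a ≤ n) := by omega
      simp [hnb]
    · rw [PySem.List.pyRange_one_cons (a := a) (b := b) hba]
      simp only [List.foldl_cons]
      have hcont : (PySem.Dict.mk ((PySem.List.pyRange lo a 1).map (fun n => (n, u n)))).contains a = false := by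
        rw [PySem.Dict.contains_eq_decide_mem_keys, pv_keys_canon]
        simp [PySem.List.mem_pyRange_one]
      have hd : ((PySem.Dict.mk ((PySem.List.pyRange lo a 1).map (fun n => (n, u n)))).insert a
            ((PySem.Dict.mk ((PySem.List.pyRange lo a 1).map (fun n => (n, u n)))).getD a [] ++ g a))
          = PySem.Dict.mk ((PySem.List.pyRange lo (a + 1) 1).map
              (fun n => (n, if n = a then g a else u n))) := by
        apply PySem.Dict.ext
        rw [PySem.Dict.getD_of_not_contains _ _ hcont,
            PySem.Dict.items_insert_of_not_contains _ _ hcont,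
            PySem.List.pyRange_one_succ_right ha, List.map_append]
        simp only [List.nil_append, List.map_cons, List.map_nil]
        congr 1
        apply List.map_congr_left
        intro n hn
        have hn' := (PySem.List.mem_pyRange_one).1 hn
        have hna : n ≠ a := by omega
        simp [hna]
      rw [hd, ih (a + 1) b (fun n => if n = a then g a else u n) (by omega) (by omega) (by omega)]
      apply List.map_congr_left
      intro n hn
      by_cases hna : n = a
      · subst hna
        have h1 : ¬ (n + 1 ≤ n) := by omega
        simp [h1]
      · have h3 : (a < n) ↔ (a ≤ n) := by omega
        simp [hna, h3]

-- one sentence absorbed into the canonical dict (A's per-sentence loop)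
lemma pv_step (g v : Int → List String) (lo M L : Int) (hM : lo - 1 ≤ M)
    (hg : ∀ n, L < n → g n = []) (hv : ∀ n, M < n → v n = []) :
    ((PySem.List.pyRange lo (L + 1) 1).foldl (fun d n => d.insert n (d.getD n [] ++ g n))
        (PySem.Dict.mk ((PySem.List.pyRange lo (M + 1) 1).map (fun n => (n, v n))))).items
      = (PySem.List.pyRange lo (max M L + 1) 1).map (fun n => (n, v n ++ g n)) := by
  by_cases hLM : L ≤ M
  · rw [pv_ovw g lo M (L + 1 - lo).toNat lo (L + 1) v (by omega) le_rfl (by omega)]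
    rw [max_eq_left hLM]
    apply List.map_congr_left
    intro n hn
    have hn' := (PySem.List.mem_pyRange_one).1 hn
    by_cases h : n < L + 1
    · simp [hn'.1, h]
    · have h1 : ¬ (lo ≤ n ∧ n < L + 1) := by omega
      simp [hg n (by omega)]
  · rw [PySem.List.pyRange_one_append lo (M + 1) (L + 1) (by omega) (by omega), List.foldl_append]
    have hmid : ((PySem.List.pyRange lo (M + 1) 1).foldl (fun d n => d.insert n (d.getD n [] ++ g n))
          (PySem.Dict.mk ((PySem.List.pyRange lo (M + 1) 1).map (fun n => (n, v n)))))
        = PySem.Dict.mk ((PySem.List.pyRange lo (M + 1) 1).map (fun n => (n, v n ++ g n))) := by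
      apply PySem.Dict.ext
      rw [pv_ovw g lo M (M + 1 - lo).toNat lo (M + 1) v (by omega) le_rfl le_rfl]
      apply List.map_congr_left
      intro n hn
      have hn' := (PySem.List.mem_pyRange_one).1 hn
      simp [hn'.1, hn'.2]
    rw [hmid]
    rw [pv_fresh g lo (L + 1 - (M + 1)).toNat (M + 1) (L + 1) (fun n => v n ++ g n)
        (by omega) (by omega) (by omega), max_eq_right (by omega : M ≤ L)]
    apply List.map_congr_left
    intro n hn
    by_cases hna : M + 1 ≤ n
    · simp [hna, hv n (by omega)]
    · simp [hna]

-- the whole of A's fold, characterised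
lemma pv_main (tls : List (List String)) (lo : Int) :
    (tls.foldl
        (fun d tokens =>
          (PySem.List.pyRange lo ((tokens.length : Int) + 1) 1).foldl
            (fun d n => d.insert n (d.getD n [] ++ pv_generate_ngrams tokens n)) d)
        PySem.Dict.empty).items
      = (PySem.List.pyRange lo (pvMax tls lo + 1) 1).map (fun n => (n, pvFlat tls n)) := by
  induction tls using List.reverseRecOn with
  | nil =>
    simp only [List.foldl_nil]
    rw [show pvMax [] lo = lo - 1 from rfl, PySem.List.pyRange_one_eq_nil (by omega)]
    rfl
  | append_singleton p t ih =>
    rw [List.foldl_append]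
    simp only [List.foldl_cons, List.foldl_nil]
    have hmk : (p.foldl
          (fun d tokens =>
            (PySem.List.pyRange lo ((tokens.length : Int) + 1) 1).foldl
              (fun d n => d.insert n (d.getD n [] ++ pv_generate_ngrams tokens n)) d)
          PySem.Dict.empty)
        = PySem.Dict.mk ((PySem.List.pyRange lo (pvMax p lo + 1) 1).map (fun n => (n, pvFlat p n))) := by
      exact PySem.Dict.ext ih
    rw [hmk]
    rw [pv_step (pv_generate_ngrams t) (pvFlat p) lo (pvMax p lo) ((t.length : Int))
        ((PySem.List.le_foldl_max_int p (fun t => ((t.length : Int))) (lo - 1)).1)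
        (fun n hn => pv_gen_nil hn) (fun n hn => pv_flat_nil p lo n hn)]
    have h1 : pvMax (p ++ [t]) lo = max (pvMax p lo) ((t.length : Int)) := by
      unfold pvMax; rw [List.foldl_append]; rfl
    have h2 : ∀ n, pvFlat (p ++ [t]) n = pvFlat p n ++ pv_generate_ngrams t n := by
      intro n; unfold pvFlat; simp [List.flatMap_append]
    rw [h1]
    apply List.map_congr_left
    intro n hn
    rw [h2]

-- ===== B-side lemmas =====

-- appending the next token extends the slice window by one
lemma pv_slice_snoc (t : List String) (i a : Int) (h0 : 0 ≤ i) (hia : i ≤ a)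
    (ha : a < (t.length : Int)) :
    PySem.List.slice t (some i) (some (a + 1))
      = PySem.List.slice t (some i) (some a) ++ [PySem.List.pyGetD t a ""] := by
  rw [PySem.List.slice_toNat t h0 (by omega), PySem.List.slice_toNat t h0 (by omega),
      PySem.List.pyGetD_eq_getElem t (i := a) "" (by omega) ha]
  have h1 : (a + 1).toNat - i.toNat = (a.toNat - i.toNat) + 1 := by omega
  rw [h1, List.take_succ]
  congr 1
  have h2 : a.toNat - i.toNat < (t.drop i.toNat).length := by
    rw [List.length_drop]; omega
  rw [List.getElem?_eq_getElem h2]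
  simp only [List.getElem_drop, Option.toList_some]
  congr 2
  omega

-- the window accumulator carries exactly the current slice; drop it from the state
lemma pv_inner_window (t : List String) (min_n i : Int) (h0 : 0 ≤ i) :
    ∀ (k : Nat) (a : Int) (d : PySem.Dict Int (List String)), ((t.length : Int) - a).toNat ≤ k → i ≤ a →
    (((PySem.List.pyRange a ((t.length : Int)) 1).foldl
        (fun (st : List String × PySem.Dict Int (List String)) j =>
          let window := st.1 ++ [PySem.List.pyGetD t j ""]
          let size := j - i + 1
          (window,
            if min_n ≤ size
            then st.2.insert size (st.2.getD size [] ++ [PySem.Str.join " " window])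
            else st.2))
        (PySem.List.slice t (some i) (some a), d)).2)
      = (PySem.List.pyRange a ((t.length : Int)) 1).foldl
          (fun d j => if min_n ≤ j - i + 1 then pvUpd d (j - i + 1) (pvGram t i (j - i + 1)) else d) d := by
  intro k
  induction k with
  | zero =>
    intro a d hk hia
    rw [PySem.List.pyRange_one_eq_nil (by omega)]
    simp only [List.foldl_nil]
  | succ k ih =>
    intro a d hk hia
    by_cases hL : (t.length : Int) ≤ a
    · rw [PySem.List.pyRange_one_eq_nil hL]
      simp only [List.foldl_nil]
    · rw [PySem.List.pyRange_one_cons (by omega)]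
      simp only [List.foldl_cons]
      have hw : PySem.List.slice t (some i) (some a) ++ [PySem.List.pyGetD t a ""]
          = PySem.List.slice t (some i) (some (a + 1)) :=
        (pv_slice_snoc t i a h0 hia (by omega)).symm
      have hg : PySem.List.slice t (some i) (some (a + 1))
          = PySem.List.slice t (some i) (some (i + (a - i + 1))) := by
        congr 2; omega
      simp only [hw]
      rw [ih (a + 1) _ (by omega) (by omega)]
      congr 1
      unfold pvUpd pvGram
      rw [← hg]

-- re-index a unit-step fold by an offset
lemma pv_foldl_shift {α : Type} (g : α → Int → α) (off : Int) :
    ∀ (k : Nat) (a b : Int) (d : α), (b - a).toNat ≤ k →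
    (PySem.List.pyRange a b 1).foldl (fun d j => g d (j + off)) d
      = (PySem.List.pyRange (a + off) (b + off) 1).foldl g d := by
  intro k
  induction k with
  | zero =>
    intro a b d hk
    rw [PySem.List.pyRange_one_eq_nil (by omega), PySem.List.pyRange_one_eq_nil (by omega)]
    simp only [List.foldl_nil]
  | succ k ih =>
    intro a b d hk
    by_cases hab : b ≤ a
    · rw [PySem.List.pyRange_one_eq_nil hab, PySem.List.pyRange_one_eq_nil (by omega)]
      simp only [List.foldl_nil]
    · rw [PySem.List.pyRange_one_cons (by omega), PySem.List.pyRange_one_cons (a := a + off) (by omega)]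
      simp only [List.foldl_cons]
      rw [show a + off + 1 = a + 1 + off by ring]
      exact ih (a + 1) b _ (by omega)

-- strip the 'size >= min_n' guard into the range's lower bound
lemma pv_guard_strip (F : PySem.Dict Int (List String) → Int → PySem.Dict Int (List String))
    (lo c : Int) (hlo : 1 ≤ lo) (d : PySem.Dict Int (List String)) :
    (PySem.List.pyRange 1 c 1).foldl (fun d n => if lo ≤ n then F d n else d) d
      = (PySem.List.pyRange lo c 1).foldl F d := by
  have hnoop : ∀ (b : Int) (d : PySem.Dict Int (List String)), b ≤ lo →
      (PySem.List.pyRange 1 b 1).foldl (fun d n => if lo ≤ n then F d n else d) d = d := by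
    intro b d hb
    have h := PySem.List.foldl_congr_mem (PySem.List.pyRange 1 b 1)
      (fun d n => if lo ≤ n then F d n else d) (fun d _ => d) d
      (by intro acc x hx
          have := (PySem.List.mem_pyRange_one).1 hx
          show (if lo ≤ x then F acc x else acc) = acc
          rw [if_neg (by omega)])
    rw [h]
    exact PySem.List.foldl_ignore _ _
  by_cases hc : lo ≤ c
  · rw [PySem.List.pyRange_one_append 1 lo c hlo hc, List.foldl_append, hnoop lo d le_rfl]
    exact PySem.List.foldl_congr_mem _ _ _ _ (by
      intro acc x hx
      have := (PySem.List.mem_pyRange_one).1 hx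
      show (if lo ≤ x then F acc x else acc) = F acc x
      rw [if_pos (by omega)])
  · rw [PySem.List.pyRange_one_eq_nil (a := lo) (by omega)]
    simp only [List.foldl_nil]
    exact hnoop c d (by omega)

-- B's per-sentence loop, massaged: per start i, an unguarded fold over sizes [min_n, L-i+1)
lemma pv_sentB (t : List String) (min_n : Int) (hlo : 1 ≤ min_n) (d : PySem.Dict Int (List String)) :
    (PySem.List.pyRange 0 ((t.length : Int)) 1).foldl
      (fun d i =>
        ((PySem.List.pyRange i ((t.length : Int)) 1).foldl
          (fun (st : List String × PySem.Dict Int (List String)) j =>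
            let window := st.1 ++ [PySem.List.pyGetD t j ""]
            let size := j - i + 1
            (window,
              if min_n ≤ size
              then st.2.insert size (st.2.getD size [] ++ [PySem.Str.join " " window])
              else st.2))
          ([], d)).2)
      d
    = (PySem.List.pyRange 0 ((t.length : Int)) 1).foldl
        (fun d i =>
          (PySem.List.pyRange min_n ((t.length : Int) - i + 1) 1).foldl
            (fun d n => pvUpd d n (pvGram t i n)) d)
        d := by
  apply PySem.List.foldl_congr_mem
  intro acc i hi
  have hi' := (PySem.List.mem_pyRange_one).1 hi
  have hnil : PySem.List.slice t (some i) (some i) = ([] : List String) := by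
    rw [PySem.List.slice_toNat t hi'.1 hi'.1]
    simp
  have hwin := pv_inner_window t min_n i hi'.1 ((t.length : Int) - i).toNat i acc le_rfl le_rfl
  rw [hnil] at hwin
  rw [hwin]
  have hshift := pv_foldl_shift
    (fun d n => if min_n ≤ n then pvUpd d n (pvGram t i n) else d) (1 - i)
    ((t.length : Int) - i).toNat i ((t.length : Int)) acc (by omega)
  have hcongr := PySem.List.foldl_congr_mem (PySem.List.pyRange i ((t.length : Int)) 1)
    (fun d j => if min_n ≤ j - i + 1 then pvUpd d (j - i + 1) (pvGram t i (j - i + 1)) else d)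
    (fun d j => (fun d n => if min_n ≤ n then pvUpd d n (pvGram t i n) else d) d (j + (1 - i))) acc
    (by intro acc' j _
        simp only [show j - i + 1 = j + (1 - i) from by ring])
  rw [hcongr, hshift, show i + (1 - i) = 1 from by ring,
      show (t.length : Int) + (1 - i) = (t.length : Int) - i + 1 from by ring]
  exact pv_guard_strip (fun d n => pvUpd d n (pvGram t i n)) min_n ((t.length : Int) - i + 1) hlo acc

-- B's size-n output for one sentence equals A's generate_ngrams
def pvGenB (t : List String) (n : Int) : List String :=
  (PySem.List.pyRange 0 ((t.length : Int) - n + 1) 1).map (fun s => pvGram t s n)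

lemma pv_genB_eq (t : List String) (n : Int) : pvGenB t n = pv_generate_ngrams t n := by
  unfold pvGenB pv_generate_ngrams pvGram
  rw [List.map_map]
  rfl

-- partial flat list of grams from starts < k (k a Nat counter over start positions)
def pvPart (t : List String) (k : Nat) (n : Int) : List String :=
  (PySem.List.pyRange 0 (min (k : Int) ((t.length : Int) - n + 1)) 1).map (fun s => pvGram t s n)

-- B's massaged per-sentence loop on the canonical dict
lemma pv_stepB (t : List String) (lo M : Int) (v : Int → List String) (hlo : 1 ≤ lo)
    (hM : lo - 1 ≤ M) (hv : ∀ n, M < n → v n = []) :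
    ((PySem.List.pyRange 0 ((t.length : Int)) 1).foldl
        (fun d i =>
          (PySem.List.pyRange lo ((t.length : Int) - i + 1) 1).foldl
            (fun d n => pvUpd d n (pvGram t i n)) d)
        (PySem.Dict.mk ((PySem.List.pyRange lo (M + 1) 1).map (fun n => (n, v n))))).items
      = (PySem.List.pyRange lo (max M ((t.length : Int)) + 1) 1).map
          (fun n => (n, v n ++ pv_generate_ngrams t n)) := by
  have hL0 : (0 : Int) ≤ (t.length : Int) := by omega
  have key : ∀ (k : Nat), (k : Int) ≤ (t.length : Int) →
      ((PySem.List.pyRange 0 ((k : Int)) 1).foldl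
          (fun d i =>
            (PySem.List.pyRange lo ((t.length : Int) - i + 1) 1).foldl
              (fun d n => pvUpd d n (pvGram t i n)) d)
          (PySem.Dict.mk ((PySem.List.pyRange lo (M + 1) 1).map (fun n => (n, v n))))).items
        = (PySem.List.pyRange lo ((if k = 0 then M else max M ((t.length : Int))) + 1) 1).map
            (fun n => (n, v n ++ pvPart t k n)) := by
    intro k
    induction k with
    | zero =>
      intro _
      simp only [Nat.cast_zero, reduceIte]
      rw [PySem.List.pyRange_one_eq_nil (a := 0) (b := 0) le_rfl]
      simp only [List.foldl_nil]
      apply List.map_congr_left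
      intro n hn
      have hpart : pvPart t 0 n = [] := by
        unfold pvPart
        rw [PySem.List.pyRange_one_eq_nil (by omega)]
        rfl
      rw [hpart, List.append_nil]
    | succ k ih =>
      intro hk
      have hcast : ((k + 1 : Nat) : Int) = (k : Int) + 1 := by push_cast; ring
      rw [hcast, PySem.List.pyRange_one_succ_right (a := 0) (b := (k : Int)) (by omega),
          List.foldl_append]
      have hdk : ((PySem.List.pyRange 0 ((k : Int)) 1).foldl
            (fun d i =>
              (PySem.List.pyRange lo ((t.length : Int) - i + 1) 1).foldl
                (fun d n => pvUpd d n (pvGram t i n)) d)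
            (PySem.Dict.mk ((PySem.List.pyRange lo (M + 1) 1).map (fun n => (n, v n)))))
          = PySem.Dict.mk ((PySem.List.pyRange lo ((if k = 0 then M else max M ((t.length : Int))) + 1) 1).map
              (fun n => (n, v n ++ pvPart t k n))) :=
        PySem.Dict.ext (ih (by omega))
      rw [hdk]
      simp only [List.foldl_cons, List.foldl_nil]
      by_cases hk0 : k = 0
      · subst hk0
        simp only [Nat.cast_zero, reduceIte]
        have hcongr : (PySem.List.pyRange lo ((t.length : Int) - (0 : Int) + 1) 1).foldl
              (fun d n => pvUpd d n (pvGram t (0 : Int) n))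
              (PySem.Dict.mk ((PySem.List.pyRange lo (M + 1) 1).map (fun n => (n, v n ++ pvPart t 0 n))))
            = (PySem.List.pyRange lo ((t.length : Int) + 1) 1).foldl
              (fun d n => d.insert n (d.getD n [] ++ (if n ≤ (t.length : Int) then [pvGram t 0 n] else [])))
              (PySem.Dict.mk ((PySem.List.pyRange lo (M + 1) 1).map (fun n => (n, v n ++ pvPart t 0 n)))) := by
          rw [show (t.length : Int) - (0 : Int) + 1 = (t.length : Int) + 1 from by ring]
          apply PySem.List.foldl_congr_mem
          intro acc n hn
          have hn' := (PySem.List.mem_pyRange_one).1 hn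
          show pvUpd acc n (pvGram t 0 n) = _
          unfold pvUpd
          rw [if_pos (by omega)]
        rw [hcongr,
            pv_step (fun n => if n ≤ (t.length : Int) then [pvGram t 0 n] else [])
              (fun n => v n ++ pvPart t 0 n) lo M ((t.length : Int)) hM
              (by intro n hn
                  show (if n ≤ (t.length : Int) then [pvGram t 0 n] else []) = []
                  rw [if_neg (by omega)])
              (by intro n hn
                  show v n ++ pvPart t 0 n = []
                  have hpart : pvPart t 0 n = [] := by
                    unfold pvPart
                    rw [PySem.List.pyRange_one_eq_nil (by omega)]
                    rfl
                  rw [hpart, List.append_nil]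
                  exact hv n hn)]
        apply List.map_congr_left
        intro n hn
        have hpart0 : pvPart t 0 n = [] := by
          unfold pvPart
          rw [PySem.List.pyRange_one_eq_nil (by omega)]
          rfl
        have hpart1 : pvPart t 1 n = (if n ≤ (t.length : Int) then [pvGram t 0 n] else []) := by
          unfold pvPart
          by_cases hnl : n ≤ (t.length : Int)
          · rw [if_pos hnl, show min ((1 : Nat) : Int) ((t.length : Int) - n + 1) = 1 from by push_cast; omega]
            rfl
          · rw [if_neg hnl, PySem.List.pyRange_one_eq_nil (by push_cast; omega)]
            rfl
        rw [hpart0, hpart1, List.append_nil]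
      · rw [if_neg hk0, if_neg (by omega : ¬ (k + 1 = 0))]
        set MT := max M ((t.length : Int)) with hMT
        have hkk : (1 : Int) ≤ (k : Int) := by omega
        simp only [pvUpd]
        rw [pv_ovw (fun n => [pvGram t (k : Int) n]) lo MT
            (((t.length : Int) - (k : Int) + 1 - lo).toNat) lo ((t.length : Int) - (k : Int) + 1)
            (fun n => v n ++ pvPart t k n) (by omega) le_rfl (by omega)]
        apply List.map_congr_left
        intro n hn
        have hn' := (PySem.List.mem_pyRange_one).1 hn
        by_cases hcase : n < (t.length : Int) - (k : Int) + 1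
        · rw [if_pos ⟨hn'.1, hcase⟩]
          have hpart : pvPart t (k + 1) n = pvPart t k n ++ [pvGram t (k : Int) n] := by
            unfold pvPart
            rw [show min (((k + 1 : Nat)) : Int) ((t.length : Int) - n + 1) = (k : Int) + 1 from by push_cast; omega,
                show min ((k : Nat) : Int) ((t.length : Int) - n + 1) = (k : Int) from by omega,
                PySem.List.pyRange_one_succ_right (a := 0) (b := (k : Int)) (by omega), List.map_append]
            rfl
          rw [hpart, List.append_assoc]
        · rw [if_neg (by omega)]
          have hpart : pvPart t (k + 1) n = pvPart t k n := by
            unfold pvPart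
            congr 2
            push_cast
            omega
          rw [hpart]
  have hfin := key t.length le_rfl
  rw [hfin]
  by_cases hL : t.length = 0
  · rw [if_pos hL, show max M ((t.length : Int)) = M from by omega]
    apply List.map_congr_left
    intro n hn
    have hn' := (PySem.List.mem_pyRange_one).1 hn
    have h1 : pvPart t t.length n = [] := by
      unfold pvPart
      rw [PySem.List.pyRange_one_eq_nil (by omega)]
      rfl
    rw [h1, pv_gen_nil (by omega)]
  · rw [if_neg hL]
    apply List.map_congr_left
    intro n hn
    have hn' := (PySem.List.mem_pyRange_one).1 hn
    rw [← pv_genB_eq]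
    unfold pvPart pvGenB
    rw [show min ((t.length : Int)) ((t.length : Int) - n + 1) = (t.length : Int) - n + 1 from by omega]

-- the whole of B's massaged fold, characterised (same canonical form as A's)
lemma pv_mainB (tls : List (List String)) (lo : Int) (hlo : 1 ≤ lo) :
    (tls.foldl
        (fun d t =>
          (PySem.List.pyRange 0 ((t.length : Int)) 1).foldl
            (fun d i =>
              (PySem.List.pyRange lo ((t.length : Int) - i + 1) 1).foldl
                (fun d n => pvUpd d n (pvGram t i n)) d)
            d)
        PySem.Dict.empty).items
      = (PySem.List.pyRange lo (pvMax tls lo + 1) 1).map (fun n => (n, pvFlat tls n)) := by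
  induction tls using List.reverseRecOn with
  | nil =>
    simp only [List.foldl_nil]
    rw [show pvMax [] lo = lo - 1 from rfl, PySem.List.pyRange_one_eq_nil (by omega)]
    rfl
  | append_singleton p t ih =>
    rw [List.foldl_append]
    simp only [List.foldl_cons, List.foldl_nil]
    have hmk : (p.foldl
          (fun d t =>
            (PySem.List.pyRange 0 ((t.length : Int)) 1).foldl
              (fun d i =>
                (PySem.List.pyRange lo ((t.length : Int) - i + 1) 1).foldl
                  (fun d n => pvUpd d n (pvGram t i n)) d)
              d)
          PySem.Dict.empty)
        = PySem.Dict.mk ((PySem.List.pyRange lo (pvMax p lo + 1) 1).map (fun n => (n, pvFlat p n))) :=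
      PySem.Dict.ext ih
    rw [hmk]
    rw [pv_stepB t lo (pvMax p lo) (pvFlat p) hlo
        ((PySem.List.le_foldl_max_int p (fun t => ((t.length : Int))) (lo - 1)).1)
        (fun n hn => pv_flat_nil p lo n hn)]
    have h1 : pvMax (p ++ [t]) lo = max (pvMax p lo) ((t.length : Int)) := by
      unfold pvMax; rw [List.foldl_append]; rfl
    have h2 : ∀ n, pvFlat (p ++ [t]) n = pvFlat p n ++ pv_generate_ngrams t n := by
      intro n; unfold pvFlat; simp [List.flatMap_append]
    rw [h1]
    apply List.map_congr_left
    intro n hn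
    rw [h2]

-- ===== VERDICT (by name: the statement is the Claim_ definition above) =====
theorem cluster_ngrams_spec : Claim_equal_cluster_ngrams := by
  intro ts min_n _ hpre
  unfold Spec_cluster_ngrams cluster_ngrams cluster_ngrams_alt
  rw [show (ts.foldl
        (fun d sentence =>
          let tokens := PySem.Str.split₀ sentence
          (PySem.List.pyRange min_n ((tokens.length : Int) + 1) 1).foldl
            (fun d n => d.insert n (d.getD n [] ++ pv_generate_ngrams tokens n)) d)
        PySem.Dict.empty)
      = ((ts.map (fun sentence => PySem.Str.split₀ sentence)).foldl
          (fun d tokens =>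
            (PySem.List.pyRange min_n ((tokens.length : Int) + 1) 1).foldl
              (fun d n => d.insert n (d.getD n [] ++ pv_generate_ngrams tokens n)) d)
          PySem.Dict.empty) from by rw [List.foldl_map]]
  rw [pv_main (ts.map (fun sentence => PySem.Str.split₀ sentence)) min_n]
  rw [show (ts.foldl
        (fun d sentence =>
          let tokens := PySem.Str.split₀ sentence
          (PySem.List.pyRange 0 ((tokens.length : Int)) 1).foldl
            (fun d i =>
              ((PySem.List.pyRange i ((tokens.length : Int)) 1).foldl
                (fun (st : List String × PySem.Dict Int (List String)) j =>
                  let window := st.1 ++ [PySem.List.pyGetD tokens j ""]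
                  let size := j - i + 1
                  (window,
                    if min_n ≤ size
                    then st.2.insert size (st.2.getD size [] ++ [PySem.Str.join " " window])
                    else st.2))
                ([], d)).2)
            d)
        PySem.Dict.empty)
      = ((ts.map (fun sentence => PySem.Str.split₀ sentence)).foldl
          (fun d tokens =>
            (PySem.List.pyRange 0 ((tokens.length : Int)) 1).foldl
              (fun d i =>
                ((PySem.List.pyRange i ((tokens.length : Int)) 1).foldl
                  (fun (st : List String × PySem.Dict Int (List String)) j =>
                    let window := st.1 ++ [PySem.List.pyGetD tokens j ""]
                    let size := j - i + 1
                    (window,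
                      if min_n ≤ size
                      then st.2.insert size (st.2.getD size [] ++ [PySem.Str.join " " window])
                      else st.2))
                  ([], d)).2)
              d)
          PySem.Dict.empty) from by rw [List.foldl_map]]
  have hB2 := PySem.List.foldl_congr_mem (ts.map (fun sentence => PySem.Str.split₀ sentence))
    (fun d tokens =>
      (PySem.List.pyRange 0 ((tokens.length : Int)) 1).foldl
        (fun d i =>
          ((PySem.List.pyRange i ((tokens.length : Int)) 1).foldl
            (fun (st : List String × PySem.Dict Int (List String)) j =>
              let window := st.1 ++ [PySem.List.pyGetD tokens j ""]
              let size := j - i + 1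
              (window,
                if min_n ≤ size
                then st.2.insert size (st.2.getD size [] ++ [PySem.Str.join " " window])
                else st.2))
            ([], d)).2)
        d)
    (fun d t =>
      (PySem.List.pyRange 0 ((t.length : Int)) 1).foldl
        (fun d i =>
          (PySem.List.pyRange min_n ((t.length : Int) - i + 1) 1).foldl
            (fun d n => pvUpd d n (pvGram t i n)) d)
        d)
    PySem.Dict.empty
    (by intro acc t _
        exact pv_sentB t min_n hpre acc)
  rw [hB2, pv_mainB (ts.map (fun sentence => PySem.Str.split₀ sentence)) min_n hpre]
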